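-- pv_equiv track=rewrite | github.com/chtenb/fate | fate/navigation.py | coord_to_position
-- ===== SOURCE A (Python) =====
-- def coord_to_position(line, column, text, crop=False):
--     pos = 0
--     while line > 1:  # line numbers start with 1
--         eol = text.find('\n', pos)
--         if eol == -1:
--             if crop:
--                 return len(text) - 1
--             raise ValueError('Line number reaches beyond text.')
--
--         pos = eol + 1
--         line -= 1
--
--     pos += column - 1  # column numbers start with 1
--     if pos >= len(text) and not crop:
--         raise ValueError('Column number reaches beyond text.')
--     pos = min(pos, len(text) - 1)
--
--     #assert (line, column) == position_to_coord(pos, text)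
--     return pos
-- ===== SOURCE B (Python) =====
-- def coord_to_position(line, column, text, crop=False):
--     # Build the table of line-start offsets once, then branch on crop first:
--     # the crop path is total (min-clamped), the non-crop path validates and raises.
--     starts = [0]
--     for i, c in enumerate(text):
--         if c == '\n':
--             starts.append(i + 1)
--     if crop:
--         if line > len(starts):
--             return len(text) - 1
--         return min(starts[max(line, 1) - 1] + column - 1, len(text) - 1)
--     if line > len(starts):
--         raise ValueError('Line number reaches beyond text.')
--     pos = starts[max(line, 1) - 1] + column - 1
--     if pos >= len(text):
--         raise ValueError('Column number reaches beyond text.')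
--     return pos
-- ===== Notes on version B (the rewrite author's own statement) =====
-- stated objective: alternative
-- what changed: B replaces A's stateful while-loop that re-calls text.find('\n', pos) once per requested line by building the table of line-start offsets in one pass over the text and then branching on crop first: a total min-clamped path vs a validating path that indexes the table directly.
import Mathlib
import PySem

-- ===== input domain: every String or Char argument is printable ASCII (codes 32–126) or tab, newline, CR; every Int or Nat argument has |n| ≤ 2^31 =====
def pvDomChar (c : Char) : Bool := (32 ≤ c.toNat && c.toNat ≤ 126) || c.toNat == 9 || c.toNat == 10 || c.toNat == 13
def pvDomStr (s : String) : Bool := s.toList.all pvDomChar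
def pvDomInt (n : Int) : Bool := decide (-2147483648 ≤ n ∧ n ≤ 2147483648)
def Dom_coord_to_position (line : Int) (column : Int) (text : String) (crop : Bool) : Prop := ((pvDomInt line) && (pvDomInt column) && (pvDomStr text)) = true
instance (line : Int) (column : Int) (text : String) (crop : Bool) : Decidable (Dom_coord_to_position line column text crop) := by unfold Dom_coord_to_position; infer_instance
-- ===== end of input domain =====

-- B replaces A's stateful newline-by-newline `find` loop by a line-start offset table
-- built in one pass, branching on crop first (total clamped path vs validating path);
-- objective: alternative decomposition. A raise in the Python (line or column beyond
-- the text, without crop) is modelled by `none` in the Option-valued helpers; such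
-- inputs are excluded by Pre_coord_to_position.

-- ===== PORT A =====
def coordLoopA (line : Int) (column : Int) (text : String) (crop : Bool) (pos : Int) : Option Int :=
  if line > 1 then
    let eol := PySem.Str.findFrom text "\n" pos none
    if eol = -1 then
      if crop then some ((PySem.Str.len text : Int) - 1) else none
    else
      coordLoopA (line - 1) column text crop (eol + 1)
  else
    let pos2 := pos + column - 1
    if pos2 ≥ (PySem.Str.len text : Int) ∧ crop = false then none
    else some (min pos2 ((PySem.Str.len text : Int) - 1))
termination_by (line - 1).toNat
decreasing_by omega

def coord_to_position (line : Int) (column : Int) (text : String) (crop : Bool) : Int :=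
  (coordLoopA line column text crop 0).getD 0

-- ===== PORT B =====
-- starts = [0]; for i, c in enumerate(text): if c == '\n': starts.append(i + 1)
def lineStarts (cs : List Char) : List Int :=
  (PySem.List.enumerate cs).foldl (fun acc p => if p.2 == '\n' then acc ++ [p.1 + 1] else acc) [0]

def coord_to_position_altOpt (line : Int) (column : Int) (text : String) (crop : Bool) : Option Int :=
  let starts := lineStarts text.toList
  let n : Int := PySem.Str.len text
  if crop then
    if line > (starts.length : Int) then some (n - 1)
    else some (min ((PySem.List.pyGet? starts (max line 1 - 1)).getD 0 + column - 1) (n - 1))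
  else
    if line > (starts.length : Int) then none
    else
      let pos := (PySem.List.pyGet? starts (max line 1 - 1)).getD 0 + column - 1
      if pos ≥ n then none else some pos

def coord_to_position_alt (line : Int) (column : Int) (text : String) (crop : Bool) : Int :=
  (coord_to_position_altOpt line column text crop).getD 0

-- ===== PRECONDITION & SPEC =====
-- Pre_ excludes exactly the inputs on which the Python A raises ValueError:
-- with crop=False, a line number beyond the text's lines or a resulting position beyond the text.
def Pre_coord_to_position (line : Int) (column : Int) (text : String) (crop : Bool) : Prop :=
  crop = true ∨
    (let nl := ((PySem.List.enumerate text.toList).filter (fun p => p.2 == '\n')).map Prod.fst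
     line - 1 ≤ (nl.length : Int) ∧
       (if line ≤ 1 then 0 else (nl.getD (line - 2).toNat 0) + 1) + column - 1 < (PySem.Str.len text : Int))

instance (line : Int) (column : Int) (text : String) (crop : Bool) : Decidable (Pre_coord_to_position line column text crop) := by
  unfold Pre_coord_to_position; infer_instance

def pvWitness_coord_to_position : Int × Int × String × Bool := (1, 1, "a", false)

def Spec_coord_to_position (line : Int) (column : Int) (text : String) (crop : Bool) (out : Int) : Prop := out = coord_to_position_alt line column text crop
instance (line : Int) (column : Int) (text : String) (crop : Bool) (out : Int) : Decidable (Spec_coord_to_position line column text crop out) := by unfold Spec_coord_to_position; infer_instance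

-- ===== CLAIM (what is proved, stated in full; the proofs are below) =====
def Claim_equal_coord_to_position : Prop := ∀ (line : Int) (column : Int) (text : String) (crop : Bool), Dom_coord_to_position line column text crop → Pre_coord_to_position line column text crop → Spec_coord_to_position line column text crop (coord_to_position line column text crop)

-- ===== LEMMAS AND PROOFS =====

-- the newline-index table, as a proof-side name
def pvNl (cs : List Char) : List Int :=
  ((PySem.List.enumerate cs).filter (fun p => p.2 == '\n')).map Prod.fst

lemma pvNl_mem_iff (cs : List Char) (x : Int) :
    x ∈ pvNl cs ↔ 0 ≤ x ∧ ∃ h : x.toNat < cs.length, cs[x.toNat] = '\n' := by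
  unfold pvNl
  simp only [List.mem_map, List.mem_filter, PySem.List.mem_enumerate_iff]
  constructor
  · rintro ⟨⟨i, c⟩, ⟨⟨k, hk, hpk⟩, hc⟩, rfl⟩
    cases hpk
    simp only [beq_iff_eq] at hc
    refine ⟨by omega, by simpa using hk, by simpa using hc⟩
  · rintro ⟨hx, hk, hc⟩
    exact ⟨(x, '\n'), ⟨⟨x.toNat, hk, by rw [hc]; simp [Int.toNat_of_nonneg hx]⟩, by simp⟩, rfl⟩

lemma pvNl_pairwise (cs : List Char) : (pvNl cs).Pairwise (· < ·) := by
  unfold pvNl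
  exact List.pairwise_map.mpr ((PySem.List.pairwise_lt_enumerate cs 0).filter _)

lemma pvNl_mono (cs : List Char) {i j : Nat} (hi : i < j) (hj : j < (pvNl cs).length) :
    (pvNl cs)[i]'(lt_trans hi hj) < (pvNl cs)[j] :=
  List.pairwise_iff_getElem.mp (pvNl_pairwise cs) i j (lt_trans hi hj) hj hi

lemma pvNl_get_spec (cs : List Char) {j : Nat} (hj : j < (pvNl cs).length) :
    0 ≤ (pvNl cs)[j] ∧ ∃ h : ((pvNl cs)[j]).toNat < cs.length, cs[((pvNl cs)[j]).toNat] = '\n' :=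
  (pvNl_mem_iff cs _).mp (List.getElem_mem hj)

def pvStartOf (nl : List Int) : Nat → Nat
  | 0 => 0
  | j + 1 => (nl.getD j 0).toNat + 1

lemma pvStartOf_le_len (cs : List Char) {j : Nat} (hj : j ≤ (pvNl cs).length) :
    pvStartOf (pvNl cs) j ≤ cs.length := by
  cases j with
  | zero => simp [pvStartOf]
  | succ k =>
    have hk : k < (pvNl cs).length := by omega
    obtain ⟨h0, hlt, hc⟩ := pvNl_get_spec cs hk
    simp only [pvStartOf, List.getD_eq_getElem _ _ hk]
    omega

-- start offset ≤ the j-th newline index (entries below j are strictly smaller)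
lemma pvStartOf_le_get (cs : List Char) {j : Nat} (hj : j < (pvNl cs).length) :
    (pvStartOf (pvNl cs) j : Int) ≤ (pvNl cs)[j] := by
  cases j with
  | zero => simp [pvStartOf]; exact (pvNl_get_spec cs hj).1
  | succ k =>
    have hk : k < (pvNl cs).length := by omega
    have hmono := pvNl_mono cs (Nat.lt_succ_self k) hj
    have h0 := (pvNl_get_spec cs hk).1
    simp only [pvStartOf, List.getD_eq_getElem _ _ hk, Nat.succ_eq_add_one] at hmono ⊢
    omega

lemma pvNl_get_lt_startOf (cs : List Char) {i j : Nat} (hij : i < j) (hj : j ≤ (pvNl cs).length) :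
    (pvNl cs)[i]'(by omega) < (pvStartOf (pvNl cs) j : Int) := by
  cases j with
  | zero => omega
  | succ k =>
    have hk : k < (pvNl cs).length := by omega
    have h0 := (pvNl_get_spec cs hk).1
    have hle : (pvNl cs)[i]'(by omega) ≤ (pvNl cs)[k] := by
      rcases Nat.lt_or_ge i k with h | h
      · exact le_of_lt (pvNl_mono cs h hk)
      · have : i = k := by omega
        subst this; exact le_refl _
    simp only [pvStartOf, List.getD_eq_getElem _ _ hk]
    omega

lemma pvFind_startOf (cs : List Char) {j : Nat} (hj : j ≤ (pvNl cs).length) :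
    PySem.Chars.findFrom cs ['\n'] ((pvStartOf (pvNl cs) j : Nat) : Int) none =
      if h : j < (pvNl cs).length then (pvNl cs)[j] else -1 := by
  have hp : pvStartOf (pvNl cs) j ≤ cs.length := pvStartOf_le_len cs hj
  split
  case isTrue h =>
    obtain ⟨ht0, htlt, htc⟩ := pvNl_get_spec cs h
    have hpt : ((pvStartOf (pvNl cs) j : Nat) : Int) ≤ (pvNl cs)[j] := pvStartOf_le_get cs h
    have hptn : pvStartOf (pvNl cs) j ≤ ((pvNl cs)[j]).toNat := by omega
    have hsub : ['\n'] <+: cs.drop ((pvNl cs)[j]).toNat := by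
      rw [List.drop_eq_getElem_cons htlt, htc]
      simp
    have hinf : ['\n'] <:+: cs.drop (pvStartOf (pvNl cs) j) := by
      refine hsub.isInfix.trans (List.IsSuffix.isInfix ?_)
      have : (cs.drop (pvStartOf (pvNl cs) j)).drop (((pvNl cs)[j]).toNat - pvStartOf (pvNl cs) j)
          = cs.drop (((pvNl cs)[j]).toNat) := by
        rw [List.drop_drop]; congr 1; omega
      rw [← this]
      exact List.drop_suffix _ _
    have hne : PySem.Chars.findFrom cs ['\n'] ((pvStartOf (pvNl cs) j : Nat) : Int) none ≠ -1 := by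
      intro hcon
      exact ((PySem.Chars.findFrom_natCast_eq_neg_one_iff cs ['\n'] _ hp).mp hcon) hinf
    obtain ⟨hge, hpref, hmin⟩ := PySem.Chars.findFrom_natCast_spec cs ['\n'] _ hp hne
    set f := PySem.Chars.findFrom cs ['\n'] ((pvStartOf (pvNl cs) j : Nat) : Int) none with hfdef
    have hf0 : 0 ≤ f := le_trans (by positivity) hge
    have hflt : f.toNat < cs.length := by
      by_contra hcon
      have : cs.drop f.toNat = [] := List.drop_eq_nil_of_le (by omega)
      rw [this] at hpref
      simpa using hpref.length_le
    have hfc : cs[f.toNat] = '\n' := by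
      rw [List.drop_eq_getElem_cons hflt] at hpref
      have := List.cons_prefix_cons.mp hpref
      exact this.1.symm
    have hfmem : f ∈ pvNl cs := (pvNl_mem_iff cs f).mpr ⟨hf0, hflt, hfc⟩
    obtain ⟨j', hj', hj'eq⟩ := List.mem_iff_getElem.mp hfmem
    have hfle : f ≤ (pvNl cs)[j] := by
      by_contra hcon
      have hlt : ((pvNl cs)[j]).toNat < f.toNat := by omega
      exact hmin _ hptn hlt hsub
    have hfge : (pvNl cs)[j] ≤ f := by
      rcases Nat.lt_or_ge j' j with hlt | hge'
      · exfalso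
        have := pvNl_get_lt_startOf cs hlt hj
        rw [hj'eq] at this
        omega
      · rcases Nat.lt_or_ge j j' with hlt | hge''
        · rw [← hj'eq]; exact le_of_lt (pvNl_mono cs hlt hj')
        · have : j = j' := by omega
          subst this; omega
    omega
  case isFalse h =>
    have hjeq : j = (pvNl cs).length := by omega
    rw [PySem.Chars.findFrom_natCast_eq_neg_one_iff cs ['\n'] _ hp]
    intro hinf
    have hmem : '\n' ∈ cs.drop (pvStartOf (pvNl cs) j) := List.singleton_sublist.mp hinf.sublist
    obtain ⟨i, hi, hieq⟩ := List.mem_iff_getElem.mp hmem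
    rw [List.getElem_drop] at hieq
    have hmem2 : ((pvStartOf (pvNl cs) j + i : Nat) : Int) ∈ pvNl cs := by
      refine (pvNl_mem_iff cs _).mpr ⟨by positivity, ?_, ?_⟩
      · simp only [Int.toNat_natCast]
        rw [List.length_drop] at hi; omega
      · simp only [Int.toNat_natCast]; exact hieq
    obtain ⟨j', hj', hj'eq⟩ := List.mem_iff_getElem.mp hmem2
    have := pvNl_get_lt_startOf cs (show j' < j by omega) hj
    rw [hj'eq] at this
    omega

lemma pvLoopA_eq (line : Int) (column : Int) (text : String) (crop : Bool) (j : Nat)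
    (hj : j ≤ (pvNl text.toList).length) :
    coordLoopA line column text crop ((pvStartOf (pvNl text.toList) j : Nat) : Int) =
      if line - 1 > ((pvNl text.toList).length : Int) - (j : Int) then
        (if crop then some ((PySem.Str.len text : Int) - 1) else none)
      else
        (let pos2 : Int := ((pvStartOf (pvNl text.toList) (j + (line - 1).toNat) : Nat) : Int) + column - 1
         if pos2 ≥ (PySem.Str.len text : Int) ∧ crop = false then none
         else some (min pos2 ((PySem.Str.len text : Int) - 1))) := by
  have key : ∀ (n : Nat) (line : Int) (j : Nat), (line - 1).toNat = n → j ≤ (pvNl text.toList).length →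
      coordLoopA line column text crop ((pvStartOf (pvNl text.toList) j : Nat) : Int) =
      if line - 1 > ((pvNl text.toList).length : Int) - (j : Int) then
        (if crop then some ((PySem.Str.len text : Int) - 1) else none)
      else
        (let pos2 : Int := ((pvStartOf (pvNl text.toList) (j + (line - 1).toNat) : Nat) : Int) + column - 1
         if pos2 ≥ (PySem.Str.len text : Int) ∧ crop = false then none
         else some (min pos2 ((PySem.Str.len text : Int) - 1))) := by
    intro n
    induction n with
    | zero =>
      intro line j hn hjle
      have hline : ¬ line > 1 := by omega
      rw [coordLoopA]
      simp only [hline, if_false, hn]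
      have hcond : ¬ (line - 1 > ((pvNl text.toList).length : Int) - (j : Int)) := by
        have : (j:Int) ≤ ((pvNl text.toList).length : Int) := by exact_mod_cast hjle
        omega
      simp only [hcond, if_false]
      simp
    | succ n ih =>
      intro line j hn hjle
      have hline : line > 1 := by omega
      rw [coordLoopA]
      simp only [hline, if_true, PySem.Str.findFrom_eq]
      have htl : ("\n" : String).toList = ['\n'] := rfl
      rw [htl, pvFind_startOf text.toList hjle]
      split
      case isTrue hlt =>
        obtain ⟨h0, hltlen, hc⟩ := pvNl_get_spec text.toList hlt
        have hne : (pvNl text.toList)[j] ≠ -1 := by omega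
        simp only [hne, if_false]
        have hstep : (pvNl text.toList)[j] + 1 = ((pvStartOf (pvNl text.toList) (j+1) : Nat) : Int) := by
          simp only [pvStartOf, List.getD_eq_getElem _ _ hlt]
          omega
        rw [hstep, ih (line - 1) (j+1) (by omega) (by omega)]
        have hc1 : (line - 1 - 1 > ((pvNl text.toList).length : Int) - ((j+1 : Nat) : Int))
            ↔ (line - 1 > ((pvNl text.toList).length : Int) - (j : Int)) := by
          push_cast; constructor <;> intro <;> omega
        have hidx : (j + 1) + (line - 1 - 1).toNat = j + (line - 1).toNat := by omega
        rw [hidx]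
        split
        case isTrue h' => rw [if_pos (hc1.mp h')]
        case isFalse h' => rw [if_neg (fun hcon => h' (hc1.mpr hcon))]
      case isFalse hge =>
        simp only [if_pos trivial]
        have hcond : line - 1 > ((pvNl text.toList).length : Int) - (j : Int) := by
          have : j = (pvNl text.toList).length := by omega
          subst this; simp; omega
        rw [if_pos hcond]
  exact key (line - 1).toNat line j rfl hj

-- B's start table is the newline table shifted by one, with 0 in front
lemma lineStarts_eq (cs : List Char) :
    lineStarts cs = 0 :: (pvNl cs).map (· + 1) := by
  unfold lineStarts pvNl
  rw [PySem.List.foldl_append_if]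
  simp [List.map_map, Function.comp]

-- B's indexed lookup into the start table is pvStartOf at (line-1).toNat
lemma pvGet_lineStarts (cs : List Char) (line : Int)
    (hle : line - 1 ≤ ((pvNl cs).length : Int)) :
    (PySem.List.pyGet? (lineStarts cs) (max line 1 - 1)).getD 0
      = ((pvStartOf (pvNl cs) (line - 1).toNat : Nat) : Int) := by
  rw [lineStarts_eq]
  by_cases h : line ≤ 1
  · have h1 : max line 1 - 1 = ((0 : Nat) : Int) := by omega
    have h2 : (line - 1).toNat = 0 := by omega
    rw [h1, PySem.List.pyGet?_natCast, h2]
    simp [pvStartOf]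
  · have hk : (line - 1).toNat = (line - 2).toNat + 1 := by omega
    have hklt : (line - 2).toNat < (pvNl cs).length := by omega
    have h1 : max line 1 - 1 = (((line - 2).toNat + 1 : Nat) : Int) := by omega
    rw [h1, PySem.List.pyGet?_natCast, hk]
    have h0' := (pvNl_get_spec cs hklt).1
    simp only [pvStartOf, List.getElem?_cons_succ, List.getElem?_map,
      List.getElem?_eq_getElem hklt, Option.map_some, Option.getD_some,
      List.getD_eq_getElem _ _ hklt]
    omega

lemma pvOpt_eq (line : Int) (column : Int) (text : String) (crop : Bool) :
    coordLoopA line column text crop 0 = coord_to_position_altOpt line column text crop := by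
  have h0 : ((pvStartOf (pvNl text.toList) 0 : Nat) : Int) = 0 := rfl
  rw [← h0, pvLoopA_eq line column text crop 0 (Nat.zero_le _)]
  unfold coord_to_position_altOpt
  have hlenStarts : (lineStarts text.toList).length = (pvNl text.toList).length + 1 := by
    rw [lineStarts_eq]; simp
  simp only [hlenStarts, Nat.cast_zero, sub_zero, Nat.zero_add]
  have hcondIff : (line > (((pvNl text.toList).length + 1 : Nat) : Int))
      ↔ (line - 1 > ((pvNl text.toList).length : Int)) := by push_cast; omega
  cases crop with
  | true =>
    simp only [if_true]
    by_cases hover : line - 1 > ((pvNl text.toList).length : Int)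
    · rw [if_pos hover, if_pos (hcondIff.mpr hover)]
    · rw [if_neg hover, if_neg (fun h => hover (hcondIff.mp h)),
          pvGet_lineStarts text.toList line (by omega)]
      simp
  | false =>
    simp only [Bool.false_eq_true, if_false]
    by_cases hover : line - 1 > ((pvNl text.toList).length : Int)
    · rw [if_pos hover, if_pos (hcondIff.mpr hover)]
    · rw [if_neg hover, if_neg (fun h => hover (hcondIff.mp h)),
          pvGet_lineStarts text.toList line (by omega)]
      split_ifs with h1 h2 h2
      · rfl
      · exact absurd h1.1 h2
      · exact absurd (And.intro h2 trivial) h1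
      · simp only [Option.some.injEq]
        omega

-- ===== VERDICT (by name: the statement is the Claim_ definition above) =====
theorem coord_to_position_spec : Claim_equal_coord_to_position := by
  intro line column text crop _ _
  unfold Spec_coord_to_position coord_to_position coord_to_position_alt
  rw [pvOpt_eq]
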